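-- pv_equiv track=rewrite | github.com/Surya12-04/ai-code-plagiarism-detector | lexical/lexical_analysis.py | normalize_identifiers
-- ===== SOURCE A (Python) =====
-- def normalize_identifiers(tokens):
--     """
--     Replace variable names with generic placeholders
--     """
--     keywords = {
--         "def", "return", "if", "elif", "else", "while", "for",
--         "in", "and", "or", "not", "break", "continue", "class"
--     }
--
--     mapping = {}
--     normalized = []
--     counter = 0
--
--     for token in tokens:
--         if token.isidentifier() and token not in keywords:
--             if token not in mapping:
--                 counter += 1
--                 mapping[token] = f"VAR_{counter}"
--             normalized.append(mapping[token])
--         else: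
--             normalized.append(token)
--
--     return normalized
-- ===== SOURCE B (Python) =====
-- def normalize_identifiers(tokens):
--     """
--     Replace variable names with generic placeholders
--     """
--     keywords = {
--         "def", "return", "if", "elif", "else", "while", "for",
--         "in", "and", "or", "not", "break", "continue", "class"
--     }
--
--     def is_target(t):
--         return t.isidentifier() and t not in keywords
--
--     def rank(t):
--         # t's placeholder number is determined positionally: one plus the
--         # number of distinct target identifiers strictly before t's first
--         # occurrence in the token stream.  No mapping table, no counter.
--         first = tokens.index(t)
--         return len({u for u in tokens[:first] if is_target(u)})
--
--     return [f"VAR_{rank(t) + 1}" if is_target(t) else t for t in tokens]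
-- ===== Notes on version B (the rewrite author's own statement) =====
-- stated objective: alternative
-- what changed: B drops A's mutable mapping/counter state entirely: each token's placeholder number is computed independently by a positional formula (one plus the count of distinct target identifiers strictly before the token's first occurrence), trading A's O(n) stateful loop for a stateless O(n^2) per-token computation.
import Mathlib
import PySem

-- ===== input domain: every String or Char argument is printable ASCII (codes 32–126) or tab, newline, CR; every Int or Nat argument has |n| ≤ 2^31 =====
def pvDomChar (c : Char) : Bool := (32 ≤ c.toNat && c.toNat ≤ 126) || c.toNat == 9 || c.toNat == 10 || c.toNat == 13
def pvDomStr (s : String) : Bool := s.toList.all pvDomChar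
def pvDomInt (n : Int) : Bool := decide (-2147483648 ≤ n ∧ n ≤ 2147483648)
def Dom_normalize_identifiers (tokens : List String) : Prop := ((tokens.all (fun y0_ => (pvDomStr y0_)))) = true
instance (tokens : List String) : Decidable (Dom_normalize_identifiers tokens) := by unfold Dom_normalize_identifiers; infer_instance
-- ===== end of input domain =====

-- B replaces A's stateful loop (mutable dict + counter) by a stateless positional formula:
-- a target token's number is one plus the count of distinct target identifiers strictly
-- before its first occurrence; objective: alternative (no state, O(n^2) instead of O(n)).

-- ===== PORT A =====
-- str.isidentifier, hand-ported: exact on the printable-ASCII domain, where an identifier is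
-- [A-Za-z_][A-Za-z0-9_]*.
def pvIsIdent (s : String) : Bool :=
  match s.toList with
  | [] => false
  | c :: rest =>
      (PySem.Chars.isalpha c || c == '_') && rest.all (fun d => PySem.Chars.isalnum d || d == '_')

def pvKeywords : PySem.Set String :=
  PySem.Set.ofList
    ["def", "return", "if", "elif", "else", "while", "for",
     "in", "and", "or", "not", "break", "continue", "class"]

def normalize_identifiers (tokens : List String) : List String :=
  (tokens.foldl
    (fun (st : PySem.Dict String String × Int × List String) token =>
      let (mapping, counter, normalized) := st
      if pvIsIdent token && !(PySem.Set.contains pvKeywords token) then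
        let (mapping, counter) :=
          if !(mapping.contains token) then
            (mapping.insert token ("VAR_" ++ PySem.Int.toStr (counter + 1)), counter + 1)
          else (mapping, counter)
        -- mapping[token]: the key is always present here, so the getD default is never used
        (mapping, counter, normalized ++ [mapping.getD token token])
      else (mapping, counter, normalized ++ [token]))
    (PySem.Dict.empty, (0 : Int), ([] : List String))).2.2

-- ===== PORT B =====
def pvIsTarget (t : String) : Bool := pvIsIdent t && !(PySem.Set.contains pvKeywords t)

-- rank(t): distinct target identifiers before t's first occurrence.
-- tokens.index(t): t is always a member here, so the getD default is never used.
def pvRank (tokens : List String) (t : String) : Int :=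
  let first := (PySem.List.index? tokens t).getD 0
  PySem.Set.len (PySem.Set.ofList
    ((PySem.List.slice tokens none (some (first : Int))).filter pvIsTarget))

def normalize_identifiers_alt (tokens : List String) : List String :=
  tokens.map (fun t =>
    if pvIsTarget t then "VAR_" ++ PySem.Int.toStr (pvRank tokens t + 1) else t)

-- ===== PRECONDITION & SPEC =====
def Spec_normalize_identifiers (tokens : List String) (out : List String) : Prop := out = normalize_identifiers_alt tokens
instance (tokens : List String) (out : List String) : Decidable (Spec_normalize_identifiers tokens out) := by unfold Spec_normalize_identifiers; infer_instance

-- ===== CLAIM (what is proved, stated in full; the proofs are below) =====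
def Claim_equal_normalize_identifiers : Prop := ∀ (tokens : List String), Dom_normalize_identifiers tokens → Spec_normalize_identifiers tokens (normalize_identifiers tokens)

-- ===== LEMMAS AND PROOFS =====
lemma get?_enum_mk (f : Int → String) (s : List String) (i : Int) (t : String) :
    (PySem.Dict.mk ((PySem.List.enumerate s i).map
        (fun p => (p.2, f p.1)))).get? t
      = (PySem.List.index? s t).map (fun (k : Nat) => f (i + (k : Int))) := by
  induction s generalizing i with
  | nil => simp [PySem.List.enumerate, PySem.Dict.get?, PySem.List.index?]
  | cons a rest ih =>
      rw [PySem.List.enumerate_cons]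
      simp only [List.map_cons, PySem.Dict.get?_mk_cons]
      by_cases h : a = t
      · subst h
        rw [PySem.List.index?_cons_self]
        simp only [beq_self_eq_true, if_pos, Option.map_some]
        norm_num
      · rw [PySem.List.index?_cons_of_ne rest h, ih]
        simp only [beq_iff_eq, if_neg h]
        cases PySem.List.index? rest t with
        | none => rfl
        | some k =>
            simp only [Option.map_some]
            have : i + 1 + (k : Int) = i + ((k : Int) + 1) := by ring
            push_cast
            rw [this]

def pvEnv (s : List String) : PySem.Dict String String :=
  PySem.Dict.mk ((PySem.List.enumerate s 0).map (fun p => (p.2, "VAR_" ++ PySem.Int.toStr (p.1 + 1))))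

lemma pvEnv_get? (s : List String) (t : String) :
    (pvEnv s).get? t
      = (PySem.List.index? s t).map (fun (k : Nat) => "VAR_" ++ PySem.Int.toStr ((k : Int) + 1)) := by
  rw [pvEnv, get?_enum_mk (fun j => "VAR_" ++ PySem.Int.toStr (j + 1))]
  cases PySem.List.index? s t with
  | none => rfl
  | some k => simp

lemma set_update_split (s xs : List String) :
    ∃ u, PySem.Set.update s xs = s ++ u := by
  induction xs generalizing s with
  | nil => exact ⟨[], by simp [PySem.Set.update]⟩
  | cons x xs ih =>
      have hstep : PySem.Set.update s (x :: xs) = PySem.Set.update (PySem.Set.add s x) xs := by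
        simp [PySem.Set.update]
      by_cases hc : PySem.Set.contains s x
      · obtain ⟨u, hu⟩ := ih (PySem.Set.add s x)
        exact ⟨u, by rw [hstep, hu, PySem.Set.add, if_pos hc]⟩
      · obtain ⟨u, hu⟩ := ih (PySem.Set.add s x)
        refine ⟨x :: u, ?_⟩
        rw [hstep, hu, PySem.Set.add, if_neg hc]
        simp

lemma pvEnv_contains (s : List String) (t : String) :
    (pvEnv s).contains t = decide (t ∈ s) := by
  rw [PySem.Dict.contains_eq_isSome_get?, pvEnv_get?]
  by_cases h : t ∈ s
  · have := (PySem.List.index?_isSome_iff s t).2 h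
    cases h' : PySem.List.index? s t with
    | none => rw [h'] at this; simp at this
    | some k => simp [h]
  · rw [(PySem.List.index?_eq_none_iff s t).2 h]
    simp [h]

lemma pvEnv_insert_fresh (s : List String) (t : String) (h : t ∉ s) :
    (pvEnv s).insert t ("VAR_" ++ PySem.Int.toStr ((s.length : Int) + 1)) = pvEnv (s ++ [t]) := by
  apply PySem.Dict.ext
  rw [PySem.Dict.items_insert_of_not_contains _ _ (by rw [pvEnv_contains]; simp [h])]
  show (pvEnv s).items ++ _ = _
  rw [pvEnv, pvEnv, PySem.List.enumerate_append]
  simp [PySem.List.enumerate]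

def pvOut (ids : List String) (t : String) : String :=
  if pvIsTarget t then
    "VAR_" ++ PySem.Int.toStr (((PySem.List.index? ids t).getD 0 : Int) + 1)
  else t

lemma update_cons (s : List String) (x : String) (xs : List String) :
    PySem.Set.update s (x :: xs) = PySem.Set.update (PySem.Set.add s x) xs := by
  simp [PySem.Set.update]

lemma main_inv (tokens : List String) : ∀ (s acc : List String),
    tokens.foldl
      (fun (st : PySem.Dict String String × Int × List String) token =>
        let (mapping, counter, normalized) := st
        if pvIsIdent token && !(PySem.Set.contains pvKeywords token) then
          let (mapping, counter) :=
            if !(mapping.contains token) then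
              (mapping.insert token ("VAR_" ++ PySem.Int.toStr (counter + 1)), counter + 1)
            else (mapping, counter)
          (mapping, counter, normalized ++ [mapping.getD token token])
        else (mapping, counter, normalized ++ [token]))
      (pvEnv s, (s.length : Int), acc)
    = (pvEnv (PySem.Set.update s (tokens.filter pvIsTarget)),
       ((PySem.Set.update s (tokens.filter pvIsTarget)).length : Int),
       acc ++ tokens.map (pvOut (PySem.Set.update s (tokens.filter pvIsTarget)))) := by
  induction tokens with
  | nil => intro s acc; simp [PySem.Set.update]
  | cons t rest ih =>
      intro s acc
      rw [List.foldl_cons, List.filter_cons, List.map_cons]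
      by_cases ht : pvIsTarget t = true
      · have hcond : (pvIsIdent t && !(PySem.Set.contains pvKeywords t)) = true := ht
        simp only [hcond, ht, if_pos]
        by_cases hm : t ∈ s
        · -- already assigned
          have hc : (pvEnv s).contains t = true := by rw [pvEnv_contains]; simp [hm]
          simp only [hc, Bool.not_true, Bool.false_eq_true, if_false]
          rw [update_cons, PySem.Set.add, if_pos (by simp [PySem.Set.contains, hm])]
          rw [ih s (acc ++ [(pvEnv s).getD t t])]
          obtain ⟨u, hu⟩ := set_update_split s (rest.filter pvIsTarget)
          have hidx : PySem.List.index? (PySem.Set.update s (rest.filter pvIsTarget)) t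
              = PySem.List.index? s t := by rw [hu]; exact PySem.List.index?_append_of_mem u hm
          have hout : pvOut (PySem.Set.update s (rest.filter pvIsTarget)) t = (pvEnv s).getD t t := by
            rw [pvOut, if_pos ht, PySem.Dict.getD_eq_get?_getD, pvEnv_get?, hidx]
            obtain ⟨k, hk⟩ := Option.isSome_iff_exists.1 ((PySem.List.index?_isSome_iff s t).2 hm)
            rw [hk]; simp
          rw [hout]
          simp
        · -- fresh identifier
          have hc : (pvEnv s).contains t = false := by rw [pvEnv_contains]; simp [hm]
          simp only [hc, Bool.not_false, if_pos]
          rw [pvEnv_insert_fresh s t hm]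
          have hlen : (s.length : Int) + 1 = ((s ++ [t]).length : Int) := by simp
          rw [hlen, update_cons, PySem.Set.add, if_neg (by simp [PySem.Set.contains, hm])]
          rw [ih (s ++ [t]) (acc ++ [(pvEnv (s ++ [t])).getD t t])]
          obtain ⟨u, hu⟩ := set_update_split (s ++ [t]) (rest.filter pvIsTarget)
          have hmem : t ∈ s ++ [t] := by simp
          have hidx : PySem.List.index? (PySem.Set.update (s ++ [t]) (rest.filter pvIsTarget)) t
              = some s.length := by
            rw [hu, PySem.List.index?_append_of_mem u hmem]
            exact PySem.List.index?_append_singleton_self s t hm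
          have hout : pvOut (PySem.Set.update (s ++ [t]) (rest.filter pvIsTarget)) t
              = (pvEnv (s ++ [t])).getD t t := by
            rw [pvOut, if_pos ht, PySem.Dict.getD_eq_get?_getD, pvEnv_get?, hidx,
              PySem.List.index?_append_singleton_self s t hm]
            simp
          rw [hout]
          simp
      · have hcond : (pvIsIdent t && !(PySem.Set.contains pvKeywords t)) = false := by
          simpa [pvIsTarget] using ht
        simp only [hcond, Bool.false_eq_true, if_false, ht]
        rw [ih s (acc ++ [t])]
        have hout : pvOut (PySem.Set.update s (rest.filter pvIsTarget)) t = t := by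
          rw [pvOut, if_neg (by simp [ht])]
        rw [hout]
        simp

-- first-occurrence index of a fresh element in the ordered dedup of xs ++ t :: ys
lemma index?_dedup_middle (xs ys : List String) (t : String) (h : t ∉ xs) :
    PySem.List.index? (PySem.List.dedup (xs ++ t :: ys)) t
      = some (PySem.List.dedup xs).length := by
  have hofl : PySem.List.dedup (xs ++ t :: ys)
      = PySem.Set.update (PySem.Set.add (PySem.Set.ofList xs) t) ys := by
    rw [PySem.List.dedup_eq_ofList, PySem.Set.ofList_eq_foldl, List.foldl_append, List.foldl_cons]
    rfl
  have hadd : PySem.Set.add (PySem.Set.ofList xs) t = PySem.Set.ofList xs ++ [t] := by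
    rw [PySem.Set.add, if_neg (by simp [PySem.Set.contains, PySem.Set.mem_ofList, h])]
  obtain ⟨u, hu⟩ := set_update_split (PySem.Set.ofList xs ++ [t]) ys
  rw [hofl, hadd, hu, PySem.List.index?_append_of_mem u (by simp),
    PySem.List.index?_append_singleton_self _ _ (by simp [PySem.Set.mem_ofList, h]),
    PySem.List.dedup_eq_ofList]

-- ===== VERDICT (by name: the statement is the Claim_ definition above) =====
theorem normalize_identifiers_spec : Claim_equal_normalize_identifiers := by
  intro tokens _
  show normalize_identifiers tokens = normalize_identifiers_alt tokens
  rw [normalize_identifiers, normalize_identifiers_alt]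
  have hinit : ((PySem.Dict.empty : PySem.Dict String String), (0 : Int), ([] : List String))
      = (pvEnv [], ((List.length ([] : List String) : Nat) : Int), ([] : List String)) := rfl
  rw [hinit, main_inv tokens [] []]
  have hupd : PySem.Set.update ([] : List String) (tokens.filter pvIsTarget)
      = PySem.List.dedup (tokens.filter pvIsTarget) := by
    rw [PySem.List.dedup_eq_ofList, PySem.Set.ofList_eq_foldl]
    simp [PySem.Set.update]
  rw [hupd]
  simp only [List.nil_append]
  apply List.map_congr_left
  intro t htok
  by_cases ht : pvIsTarget t = true
  · rw [pvOut, if_pos ht, if_pos ht]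
    -- decompose tokens at t's first occurrence
    obtain ⟨j, hj⟩ := Option.isSome_iff_exists.1 ((PySem.List.index?_isSome_iff tokens t).2 htok)
    obtain ⟨pre, suf, hsplit, hlenpre, hnotpre⟩ := (PySem.List.index?_eq_some_iff tokens t j).1 hj
    have hfilter : (pre ++ t :: suf).filter pvIsTarget
        = pre.filter pvIsTarget ++ t :: suf.filter pvIsTarget := by
      rw [List.filter_append, List.filter_cons, if_pos ht]
    have hnotprefilter : t ∉ pre.filter pvIsTarget := fun hmem =>
      hnotpre (List.mem_of_mem_filter hmem)
    have hA : PySem.List.index? (PySem.List.dedup (tokens.filter pvIsTarget)) t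
        = some (PySem.List.dedup (pre.filter pvIsTarget)).length := by
      rw [hsplit, hfilter]
      exact index?_dedup_middle _ _ _ hnotprefilter
    have htake : PySem.List.slice tokens none (some ((j : Nat) : Int)) = pre := by
      rw [PySem.List.slice_to_natCast, hsplit, ← hlenpre, List.take_left]
    rw [hA, pvRank, hj]
    simp only [Option.getD_some, htake]
    rw [PySem.Set.len, ← PySem.List.dedup_eq_ofList]
  · rw [pvOut, if_neg (by simp [ht]), if_neg (by simp [ht])]
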